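-- pv_equiv track=rewrite | github.com/FrostKni/Adaptive_Honeypot | src/cognitive/profiler.py | _infer_knowledge
-- ===== SOURCE A (Python) =====
-- from typing import List, Dict, Any, Optional, Tuple
--
-- def _infer_knowledge(commands: List[str], events: List[Dict[str, Any]]) -> List[str]:
--     """Infer what attacker has learned."""
--     knowledge = []
--
--     for cmd in commands:
--         cmd_lower = cmd.lower() if cmd else ""
--
--         if "whoami" in cmd_lower:
--             knowledge.append("current_user")
--         if "id" in cmd_lower:
--             knowledge.append("user_groups")
--         if "cat /etc/passwd" in cmd_lower:
--             knowledge.append("user_list")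
--         if "ifconfig" in cmd_lower or "ip addr" in cmd_lower:
--             knowledge.append("network_config")
--         if "netstat" in cmd_lower or "ss" in cmd_lower:
--             knowledge.append("network_connections")
--         if "ps aux" in cmd_lower or "ps -ef" in cmd_lower:
--             knowledge.append("running_processes")
--
--     return list(set(knowledge))
-- ===== SOURCE B (Python) =====
-- RULES = [
--     ("current_user", ["whoami"]),
--     ("user_groups", ["id"]),
--     ("user_list", ["cat /etc/passwd"]),
--     ("network_config", ["ifconfig", "ip addr"]),
--     ("network_connections", ["netstat", "ss"]),
--     ("running_processes", ["ps aux", "ps -ef"]),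
-- ]
--
-- def _infer_knowledge(commands, events):
--     # Lower every command once, up front.
--     lows = [cmd.lower() if cmd else "" for cmd in commands]
--     # Inverted nesting: for each label, scan ALL commands; a label is learned
--     # iff some command contains one of its trigger keywords.  No duplicate
--     # accumulation, so no dedup pass is needed; the output is the set of
--     # learned labels (emitted in sorted order, one determinate representative
--     # of the unordered result).
--     learned = [label for label, kws in RULES
--                if any(kw in low for low in lows for kw in kws)]
--     return sorted(learned)
-- ===== Notes on version B (the rewrite author's own statement) =====
-- stated objective: alternative
-- what changed: Inverts the loop nesting: instead of A's per-command six-branch if/append chain that accumulates duplicate labels and dedups with set() at the end, B lowers all commands once, then does one per-label pass over all commands (any keyword in any lowered command) so each label is decided exactly once and no dedup is needed; the result is the same label set (output order of list(set(...)) is unspecified, B emits it sorted).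
import Mathlib
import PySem

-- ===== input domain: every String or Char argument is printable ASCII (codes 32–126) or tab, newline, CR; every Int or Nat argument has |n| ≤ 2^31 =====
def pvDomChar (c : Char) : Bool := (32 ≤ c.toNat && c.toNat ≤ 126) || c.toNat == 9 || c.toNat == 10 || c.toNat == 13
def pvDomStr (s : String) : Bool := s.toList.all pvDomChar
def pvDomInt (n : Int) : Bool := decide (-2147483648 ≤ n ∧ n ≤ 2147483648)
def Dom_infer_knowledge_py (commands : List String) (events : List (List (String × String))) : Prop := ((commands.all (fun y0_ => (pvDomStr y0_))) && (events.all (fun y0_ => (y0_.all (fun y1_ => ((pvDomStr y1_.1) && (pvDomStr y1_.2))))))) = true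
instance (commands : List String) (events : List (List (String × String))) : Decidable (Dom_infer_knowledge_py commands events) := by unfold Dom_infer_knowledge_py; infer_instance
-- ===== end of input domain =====

-- B inverts the loop nesting (one per-label scan over all commands, no dedup pass)
-- instead of A's per-command branch chain with a final set() dedup; objective: alternative.
-- The order of Python's list(set(...)) is hash-seed-dependent (outputs are compared as
-- sets), so BOTH ports emit the unordered result canonically: distinct labels, sorted.

-- ===== PORT A =====
-- loop body of A's 'for cmd in commands' (the six if/append branches, in order)
def pvStepA (acc : List String) (cmd : String) : List String :=
  let cmd_lower := if cmd ≠ "" then PySem.Str.lower cmd else ""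
  let acc := if PySem.Str.isIn "whoami" cmd_lower then acc ++ ["current_user"] else acc
  let acc := if PySem.Str.isIn "id" cmd_lower then acc ++ ["user_groups"] else acc
  let acc := if PySem.Str.isIn "cat /etc/passwd" cmd_lower then acc ++ ["user_list"] else acc
  let acc := if PySem.Str.isIn "ifconfig" cmd_lower || PySem.Str.isIn "ip addr" cmd_lower then acc ++ ["network_config"] else acc
  let acc := if PySem.Str.isIn "netstat" cmd_lower || PySem.Str.isIn "ss" cmd_lower then acc ++ ["network_connections"] else acc
  let acc := if PySem.Str.isIn "ps aux" cmd_lower || PySem.Str.isIn "ps -ef" cmd_lower then acc ++ ["running_processes"] else acc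
  acc

def infer_knowledge_py (commands : List String) (events : List (List (String × String))) : List String :=
  let knowledge := commands.foldl pvStepA []
  -- list(set(knowledge)): the distinct elements; their Python order is hash-dependent,
  -- rendered here in sorted order (the canonical representative of the unordered value)
  PySem.List.sorted (PySem.Set.ofList knowledge) (fun x => x) false

-- ===== PORT B =====
-- B's RULES table
def pvRules : List (String × List String) :=
  [("current_user", ["whoami"]),
   ("user_groups", ["id"]),
   ("user_list", ["cat /etc/passwd"]),
   ("network_config", ["ifconfig", "ip addr"]),
   ("network_connections", ["netstat", "ss"]),
   ("running_processes", ["ps aux", "ps -ef"])]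

def infer_knowledge_py_alt (commands : List String) (events : List (List (String × String))) : List String :=
  let lows := commands.map (fun cmd => if cmd ≠ "" then PySem.Str.lower cmd else "")
  let learned := (pvRules.filter (fun r =>
    lows.any (fun low => r.2.any (fun kw => PySem.Str.isIn kw low)))).map Prod.fst
  PySem.List.sorted learned (fun x => x) false

-- ===== PRECONDITION & SPEC =====
def Spec_infer_knowledge_py (commands : List String) (events : List (List (String × String))) (out : List String) : Prop := out = infer_knowledge_py_alt commands events
instance (commands : List String) (events : List (List (String × String))) (out : List String) : Decidable (Spec_infer_knowledge_py commands events out) := by unfold Spec_infer_knowledge_py; infer_instance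

-- ===== CLAIM (what is proved, stated in full; the proofs are below) =====
def Claim_equal_infer_knowledge_py : Prop := ∀ (commands : List String) (events : List (List (String × String))), Dom_infer_knowledge_py commands events → Spec_infer_knowledge_py commands events (infer_knowledge_py commands events)

-- ===== LEMMAS AND PROOFS =====

-- labels A's loop body appends for one command (in rule order)
def pvInner (cmd : String) : List String :=
  (pvRules.filter (fun r =>
    r.2.any (fun kw => PySem.Str.isIn kw (if cmd ≠ "" then PySem.Str.lower cmd else "")))).map Prod.fst

-- A's loop body appends exactly the labels of the rules its command triggers
theorem pvStepA_eq_append (acc : List String) (cmd : String) :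
    pvStepA acc cmd = acc ++ pvInner cmd := by
  unfold pvStepA pvInner pvRules
  generalize (if cmd ≠ "" then PySem.Str.lower cmd else "") = s
  simp only [List.filter_cons, List.filter_nil, List.any_cons, List.any_nil, Bool.or_false]
  generalize PySem.Str.isIn "whoami" s = b1
  generalize PySem.Str.isIn "id" s = b2
  generalize PySem.Str.isIn "cat /etc/passwd" s = b3
  generalize PySem.Str.isIn "ifconfig" s = b4
  generalize PySem.Str.isIn "ip addr" s = b5
  generalize PySem.Str.isIn "netstat" s = b6
  generalize PySem.Str.isIn "ss" s = b7
  generalize PySem.Str.isIn "ps aux" s = b8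
  generalize PySem.Str.isIn "ps -ef" s = b9
  cases b1 <;> cases b2 <;> cases b3 <;> cases b4 <;> cases b5 <;> cases b6 <;>
    cases b7 <;> cases b8 <;> cases b9 <;> simp

theorem pvFoldl_eq (l : List String) (acc : List String) :
    l.foldl pvStepA acc = acc ++ l.flatMap pvInner := by
  induction l generalizing acc with
  | nil => simp
  | cons c t ih => simp [List.foldl, ih, pvStepA_eq_append]

-- the two deduplicated hit lists contain the same labels
theorem pvMem_iff (commands : List String) (a : String) :
    a ∈ PySem.Set.ofList (commands.flatMap pvInner) ↔
    a ∈ (pvRules.filter (fun r =>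
      (commands.map (fun cmd => if cmd ≠ "" then PySem.Str.lower cmd else "")).any
        (fun low => r.2.any (fun kw => PySem.Str.isIn kw low)))).map Prod.fst := by
  simp only [PySem.Set.mem_ofList, List.mem_flatMap, pvInner, List.mem_map, List.mem_filter,
    List.any_eq_true, List.mem_map]
  constructor
  · rintro ⟨cmd, hc, r, ⟨hr, kw, hkw, hin⟩, rfl⟩
    exact ⟨r, ⟨hr, _, ⟨cmd, hc, rfl⟩, kw, hkw, hin⟩, rfl⟩
  · rintro ⟨r, ⟨hr, low, ⟨cmd, hc, rfl⟩, kw, hkw, hin⟩, rfl⟩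
    exact ⟨cmd, hc, r, ⟨hr, kw, hkw, hin⟩, rfl⟩

-- B's filtered label list has no duplicates (the table's labels are distinct)
theorem pvNodup_learned (p : String × List String → Bool) :
    ((pvRules.filter p).map Prod.fst).Nodup := by
  have h : (pvRules.map Prod.fst).Nodup := by decide
  exact h.sublist ((pvRules.filter_sublist).map Prod.fst)

-- ===== VERDICT (by name: the statement is the Claim_ definition above) =====
theorem infer_knowledge_py_spec : Claim_equal_infer_knowledge_py := by
  intro commands events _
  unfold Spec_infer_knowledge_py infer_knowledge_py infer_knowledge_py_alt
  rw [pvFoldl_eq, List.nil_append]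
  rw [PySem.List.sorted_id_eq_sorted_id_iff_perm]
  refine (List.perm_ext_iff_of_nodup (PySem.Set.nodup_ofList _) (pvNodup_learned _)).mpr ?_
  intro a
  exact pvMem_iff commands a
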